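-- pv_equiv track=rewrite | github.com/replay9zz/rekobee_analyzer | core/utils/printing.py | get_enumerated_list
-- ===== SOURCE A (Python) =====
-- def get_enumerated_list(label_len: int, body: str) -> str:
--     """
--     Replace the newlines in the body, just like the numbered list does.
--
--     Has prefix alignment but not the prefix itself.
--     """
--     tab = " " * (label_len + 1)
--     body_lines = body.split("\n")
--     result_lines = [body_lines[0],]
--     for enumerator, part in enumerate(body_lines[1:], 1):
--         result_lines.append(f"{tab}{enumerator}) {part}")
--     result = "\n".join(result_lines)
--     return result
-- ===== SOURCE B (Python) =====
-- def get_enumerated_list(label_len: int, body: str) -> str: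
--     """Single character-level pass: replace each newline with an aligned
--     numbered prefix, keeping a running counter (no split into lines)."""
--     tab = " " * (label_len + 1)
--     out = []
--     n = 0
--     for ch in body:
--         if ch == "\n":
--             n += 1
--             out.append("\n" + tab + str(n) + ") ")
--         else:
--             out.append(ch)
--     return "".join(out)
-- ===== Notes on version B (the rewrite author's own statement) =====
-- stated objective: alternative
-- what changed: B does a single character-level scan over the string with a running newline counter, emitting '\n'+tab+'n) ' in place of each newline, instead of A's split-into-lines list construction with enumerate and a '\n'.join.
import Mathlib
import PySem

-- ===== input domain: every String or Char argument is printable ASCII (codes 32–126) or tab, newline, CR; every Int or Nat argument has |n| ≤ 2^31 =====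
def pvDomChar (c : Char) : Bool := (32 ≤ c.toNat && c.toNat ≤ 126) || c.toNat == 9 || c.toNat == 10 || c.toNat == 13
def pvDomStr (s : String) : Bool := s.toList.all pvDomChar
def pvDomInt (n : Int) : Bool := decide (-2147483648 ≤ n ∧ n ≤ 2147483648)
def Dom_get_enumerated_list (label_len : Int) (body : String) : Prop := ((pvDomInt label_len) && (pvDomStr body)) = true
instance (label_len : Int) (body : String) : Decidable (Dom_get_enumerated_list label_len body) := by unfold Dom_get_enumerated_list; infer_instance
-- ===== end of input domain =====

-- B replaces A's split/enumerate/join list pipeline by a single character scan with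
-- a running counter (objective: alternative, same cost, no list of lines built).

-- ===== PORT A =====
-- f"{tab}{enumerator}) {part}"
def pvFmt (tab : List Char) (p : Int × List Char) : List Char :=
  tab ++ PySem.Int.toChars p.1 ++ [')', ' '] ++ p.2

def get_enumerated_list (label_len : Int) (body : String) : String :=
  let tab : List Char := PySem.List.pyRepeat [' '] (label_len + 1)
  let body_lines : List (List Char) := PySem.Chars.splitOn body.toList ['\n']
  let result_lines : List (List Char) := [body_lines.headD []]   -- body_lines[0]; split always non-empty
  let result_lines :=
    (PySem.List.enumerate (PySem.List.slice body_lines (some 1) none) 1).foldl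
      (fun acc p => acc ++ [pvFmt tab p]) result_lines
  String.mk (PySem.Chars.join ['\n'] result_lines)

-- ===== PORT B =====
-- the loop body of B: on '\n' bump the counter and emit the numbered prefix, else copy the char
def pvStep (tab : List Char) (s : List (List Char) × Int) (c : Char) : List (List Char) × Int :=
  if c = '\n' then
    (s.1 ++ [('\n' :: tab) ++ PySem.Int.toChars (s.2 + 1) ++ [')', ' ']], s.2 + 1)
  else (s.1 ++ [[c]], s.2)

def get_enumerated_list_alt (label_len : Int) (body : String) : String :=
  let tab : List Char := PySem.List.pyRepeat [' '] (label_len + 1)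
  String.mk ((body.toList.foldl (pvStep tab) ([], 0)).1.flatten)

-- ===== PRECONDITION & SPEC =====
def Spec_get_enumerated_list (label_len : Int) (body : String) (out : String) : Prop := out = get_enumerated_list_alt label_len body
instance (label_len : Int) (body : String) (out : String) : Decidable (Spec_get_enumerated_list label_len body out) := by unfold Spec_get_enumerated_list; infer_instance

-- ===== CLAIM (what is proved, stated in full; the proofs are below) =====
def Claim_equal_get_enumerated_list : Prop := ∀ (label_len : Int) (body : String), Dom_get_enumerated_list label_len body → Spec_get_enumerated_list label_len body (get_enumerated_list label_len body)

-- ===== LEMMAS AND PROOFS =====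

-- reference shape of body.split("\n"): (first piece, remaining pieces)
def mySplit : List Char → List Char × List (List Char)
  | [] => ([], [])
  | c :: r =>
    let p := mySplit r
    if c = '\n' then ([], p.1 :: p.2) else (c :: p.1, p.2)

-- what A's numbered join produces after the first piece
def gNum (tab : List Char) : Int → List (List Char) → List Char
  | _, [] => []
  | n, p :: ps => ('\n' :: (tab ++ PySem.Int.toChars n ++ [')', ' '] ++ p)) ++ gNum tab (n + 1) ps

-- common character-level description of the result (n = next enumerator)
def fRep (tab : List Char) : Int → List Char → List Char
  | _, [] => []
  | n, c :: r =>
    if c = '\n' then ('\n' :: (tab ++ PySem.Int.toChars n ++ [')', ' '])) ++ fRep tab (n + 1) r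
    else c :: fRep tab n r

theorem splitOn_go_eq (l : List Char) : ∀ (fuel : Nat) (cur : List Char) (acc : List (List Char)),
    l.length < fuel →
    PySem.Chars.splitOn.go ['\n'] fuel l cur acc
      = acc.reverse ++ (cur.reverse ++ (mySplit l).1) :: (mySplit l).2 := by
  induction l with
  | nil =>
    intro fuel cur acc h
    cases fuel with
    | zero => omega
    | succ fuel => rw [PySem.Chars.splitOn.go.eq_def]; simp [mySplit]
  | cons c r ih =>
    intro fuel cur acc h
    cases fuel with
    | zero => omega
    | succ fuel =>
      rw [PySem.Chars.splitOn.go.eq_def]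
      simp only [List.isPrefixOf, List.isPrefixOf_nil_left, Bool.and_true]
      by_cases hc : c = '\n'
      · subst hc
        simp only [beq_self_eq_true, if_pos]
        rw [show List.drop (['\n'].length) ('\n' :: r) = r from rfl,
          ih fuel [] (cur.reverse :: acc) (by simpa using Nat.lt_of_succ_lt_succ h)]
        simp [mySplit]
      · have : ('\n' == c) = false := by
          rw [beq_eq_false_iff_ne]; exact fun hh => hc hh.symm
        simp only [this, Bool.false_eq_true, if_false]
        rw [ih fuel (c :: cur) acc (by simpa using Nat.lt_of_succ_lt_succ h)]
        simp [mySplit, hc]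

theorem splitOn_eq (cs : List Char) :
    PySem.Chars.splitOn cs ['\n'] = (mySplit cs).1 :: (mySplit cs).2 := by
  show PySem.Chars.splitOn.go ['\n'] (cs.length + 1) cs [] [] = _
  rw [splitOn_go_eq cs (cs.length + 1) [] [] (by omega)]
  simp

theorem join_gNum (tab : List Char) (ls : List (List Char)) : ∀ (h : List Char) (n : Int),
    PySem.Chars.join ['\n'] (h :: (PySem.List.enumerate ls n).map (pvFmt tab))
      = h ++ gNum tab n ls := by
  induction ls with
  | nil => intro h n; simp [PySem.List.enumerate, PySem.Chars.join_singleton, gNum]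
  | cons p ps ih =>
    intro h n
    rw [PySem.List.enumerate_cons, List.map_cons, PySem.Chars.join_cons_cons, ih]
    simp [pvFmt, gNum]

theorem mySplit_fRep (tab : List Char) (cs : List Char) : ∀ (n : Int),
    (mySplit cs).1 ++ gNum tab n (mySplit cs).2 = fRep tab n cs := by
  induction cs with
  | nil => intro n; simp [mySplit, gNum, fRep]
  | cons c r ih =>
    intro n
    by_cases hc : c = '\n'
    · subst hc
      simp only [mySplit, if_pos rfl, fRep]
      rw [← ih (n + 1)]
      simp [gNum]
    · simp only [mySplit, if_neg hc, fRep]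
      rw [← ih n]
      simp

theorem foldl_pvStep (tab : List Char) (cs : List Char) : ∀ (acc : List (List Char)) (n : Int),
    ((cs.foldl (pvStep tab) (acc, n)).1).flatten = acc.flatten ++ fRep tab (n + 1) cs := by
  induction cs with
  | nil => intro acc n; simp [fRep]
  | cons c r ih =>
    intro acc n
    by_cases hc : c = '\n'
    · subst hc
      simp only [List.foldl_cons, pvStep, if_pos rfl]
      rw [ih]
      simp [fRep]
    · simp only [List.foldl_cons, pvStep, if_neg hc]
      rw [ih]
      simp [fRep, hc]

-- ===== VERDICT (by name: the statement is the Claim_ definition above) =====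
theorem get_enumerated_list_spec : Claim_equal_get_enumerated_list := by
  intro label_len body _
  unfold Spec_get_enumerated_list get_enumerated_list get_enumerated_list_alt
  simp only [splitOn_eq, PySem.List.slice_from _ (by norm_num : (0:Int) ≤ 1),
    List.headD_cons, Int.toNat_one, List.drop_one, List.tail_cons,
    PySem.List.foldl_append_singleton_eq_map, List.singleton_append]
  rw [foldl_pvStep]
  rw [join_gNum]
  rw [mySplit_fRep]
  norm_num
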